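-- pv_equiv track=rewrite | github.com/sediusocialbucuresti/obscura | tools/b2b_official_source_ingest.py | selected_description
-- ===== SOURCE A (Python) =====
-- from typing import Any, Iterable, Iterator, TextIO
--
-- def selected_description(descriptions: list[dict[str, Any]] | None, prefer: tuple[str, ...] = ("1", "3", "2")) -> str:
--     if not descriptions:
--         return ""
--     for language in prefer:
--         for item in descriptions:
--             if text(item.get("languageCode")) == language:
--                 label = text(item.get("description"))
--                 if label:
--                     return label
--     for item in descriptions:
--         description = text(item.get("description"))
--         if description:
--             return description
--     return ""
--
-- def text(value: Any) -> str:
--     if value is None: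
--         return ""
--     return str(value).strip()
-- ===== SOURCE B (Python) =====
-- def selected_description(descriptions, prefer=("1", "3", "2")):
--     if not descriptions:
--         return ""
--     index = {}
--     fallback = ""
--     for item in descriptions:
--         label = text(item.get("description"))
--         if not label:
--             continue
--         if not fallback:
--             fallback = label
--         code = text(item.get("languageCode"))
--         if code not in index:
--             index[code] = label
--     for language in prefer:
--         if language in index:
--             return index[language]
--     return fallback
--
-- def text(value):
--     if value is None:
--         return ""
--     return str(value).strip()
-- ===== Notes on version B (the rewrite author's own statement) =====
-- stated objective: alternative
-- what changed: Replaces the nested prefer-by-descriptions scan (plus a separate fallback scan) with a single pass over descriptions that builds a first-nonempty-description-per-languageCode index and captures the overall fallback, then one lookup loop over prefer; trades A's early exit on an early match for a guaranteed single pass.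
import Mathlib
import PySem

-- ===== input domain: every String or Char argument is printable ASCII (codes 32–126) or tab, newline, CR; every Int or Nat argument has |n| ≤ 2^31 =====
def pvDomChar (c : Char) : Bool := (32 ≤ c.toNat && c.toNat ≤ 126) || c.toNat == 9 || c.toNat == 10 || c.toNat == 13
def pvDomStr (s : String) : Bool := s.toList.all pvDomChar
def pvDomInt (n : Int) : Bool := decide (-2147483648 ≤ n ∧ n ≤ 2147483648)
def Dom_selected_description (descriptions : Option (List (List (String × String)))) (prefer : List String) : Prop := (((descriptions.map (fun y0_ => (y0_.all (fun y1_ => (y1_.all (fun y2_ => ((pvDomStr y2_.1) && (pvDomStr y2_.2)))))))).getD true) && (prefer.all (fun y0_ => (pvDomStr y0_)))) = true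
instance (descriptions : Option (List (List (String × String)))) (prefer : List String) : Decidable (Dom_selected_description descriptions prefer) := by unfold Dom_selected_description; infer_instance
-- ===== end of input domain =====

-- B builds a first-nonempty-description-per-languageCode index (and the overall fallback) in ONE pass,
-- then looks prefer up in it, replacing A's nested prefer×descriptions scan plus separate fallback scan.

-- shared helper: Python's `text(value)` ('' on None, str(value).strip() otherwise; values here are str)
def pyText (v : Option String) : String :=
  match v with
  | none => ""
  | some s => PySem.Str.strip s

-- shared helper: `item.get(k)` on a dict rendered as an association list (first match)
def pyGetItem (item : List (String × String)) (k : String) : Option String :=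
  match item with
  | [] => none
  | (k', v) :: rest => if k' = k then some v else pyGetItem rest k

-- ===== PORT A =====
-- inner loop: `for item in descriptions:` under a fixed `language` (returns some label on `return label`)
def aScanLang (ds : List (List (String × String))) (language : String) : Option String :=
  match ds with
  | [] => none
  | item :: rest =>
    if pyText (pyGetItem item "languageCode") = language then
      let label := pyText (pyGetItem item "description")
      if label ≠ "" then some label else aScanLang rest language
    else aScanLang rest language

-- outer loop: `for language in prefer:`
def aPreferLoop (ds : List (List (String × String))) (prefer : List String) : Option String :=
  match prefer with
  | [] => none
  | l :: ls =>
    match aScanLang ds l with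
    | some s => some s
    | none => aPreferLoop ds ls

-- final loop: first nonempty description
def aFallback (ds : List (List (String × String))) : Option String :=
  match ds with
  | [] => none
  | item :: rest =>
    let description := pyText (pyGetItem item "description")
    if description ≠ "" then some description else aFallback rest

def selected_description (descriptions : Option (List (List (String × String)))) (prefer : List String) : String :=
  match descriptions with
  | none => ""
  | some ds =>
    if ds = [] then ""
    else
      match aPreferLoop ds prefer with
      | some s => s
      | none =>
        match aFallback ds with
        | some s => s
        | none => ""

-- ===== PORT B =====
-- single pass: build (index, fallback); `code not in index` keeps the first nonempty label per code
def bBuild (ds : List (List (String × String))) (index : PySem.Dict String String) (fallback : String) :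
    PySem.Dict String String × String :=
  match ds with
  | [] => (index, fallback)
  | item :: rest =>
    let label := pyText (pyGetItem item "description")
    if label = "" then bBuild rest index fallback
    else
      let fallback' := if fallback = "" then label else fallback
      let code := pyText (pyGetItem item "languageCode")
      let index' := if index.contains code then index else index.insert code label
      bBuild rest index' fallback'

-- `for language in prefer: if language in index: return index[language]`
def bLookup (index : PySem.Dict String String) (prefer : List String) : Option String :=
  match prefer with
  | [] => none
  | l :: ls =>
    match index.get? l with
    | some s => some s
    | none => bLookup index ls

def selected_description_alt (descriptions : Option (List (List (String × String)))) (prefer : List String) : String :=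
  match descriptions with
  | none => ""
  | some ds =>
    if ds = [] then ""
    else
      let st := bBuild ds PySem.Dict.empty ""
      match bLookup st.1 prefer with
      | some s => s
      | none => st.2

-- ===== PRECONDITION & SPEC =====
def Spec_selected_description (descriptions : Option (List (List (String × String)))) (prefer : List String) (out : String) : Prop := out = selected_description_alt descriptions prefer
instance (descriptions : Option (List (List (String × String)))) (prefer : List String) (out : String) : Decidable (Spec_selected_description descriptions prefer out) := by unfold Spec_selected_description; infer_instance

-- ===== CLAIM (what is proved, stated in full; the proofs are below) =====
def Claim_equal_selected_description : Prop := ∀ (descriptions : Option (List (List (String × String)))) (prefer : List String), Dom_selected_description descriptions prefer → Spec_selected_description descriptions prefer (selected_description descriptions prefer)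

-- ===== LEMMAS AND PROOFS =====

-- a nonempty fallback is preserved by bBuild
theorem bBuild_fallback_stuck (ds : List (List (String × String))) (index : PySem.Dict String String)
    (fb : String) (h : fb ≠ "") : (bBuild ds index fb).2 = fb := by
  induction ds generalizing index with
  | nil => rfl
  | cons item rest ih =>
    simp only [bBuild]
    split
    · exact ih _
    · exact ih _

-- the built index answers a key exactly as A's per-language scan does (modulo the accumulator)
theorem bBuild_get? (ds : List (List (String × String))) (index : PySem.Dict String String)
    (fallback : String) (l : String) :
    (bBuild ds index fallback).1.get? l =
      match index.get? l with
      | some v => some v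
      | none => aScanLang ds l := by
  induction ds generalizing index fallback with
  | nil => cases hg : index.get? l <;> simp [bBuild, aScanLang, hg]
  | cons item rest ih =>
    simp only [bBuild, aScanLang]
    by_cases hlab : pyText (pyGetItem item "description") = ""
    · rw [if_pos hlab, ih]
      by_cases hcode : pyText (pyGetItem item "languageCode") = l
      · cases hg : index.get? l <;> simp [hcode, hlab]
      · cases hg : index.get? l <;> simp [hcode]
    · rw [if_neg hlab]
      by_cases hcode : pyText (pyGetItem item "languageCode") = l
      · subst hcode
        by_cases hc : index.contains (pyText (pyGetItem item "languageCode")) = true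
        · rw [if_pos hc, ih]
          have hs : (index.get? (pyText (pyGetItem item "languageCode"))).isSome = true := by
            rw [← PySem.Dict.contains_eq_isSome_get?]; exact hc
          obtain ⟨v, hv⟩ := Option.isSome_iff_exists.mp hs
          simp [hv]
        · rw [if_neg hc, ih]
          have hg : index.get? (pyText (pyGetItem item "languageCode")) = none := by
            rw [← Option.not_isSome_iff_eq_none, ← PySem.Dict.contains_eq_isSome_get?]
            simpa using hc
          rw [PySem.Dict.get?_insert_self]
          simp [hg, hlab]
      · by_cases hc : index.contains (pyText (pyGetItem item "languageCode")) = true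
        · rw [if_pos hc, ih]
          cases hg : index.get? l <;> simp [hcode]
        · rw [if_neg hc, ih, PySem.Dict.get?_insert,
            if_neg (fun h => hcode h.symm)]
          cases hg : index.get? l <;> simp [hcode]

-- the built fallback is A's fallback scan when starting from ""
theorem bBuild_fallback (ds : List (List (String × String))) (index : PySem.Dict String String) :
    (bBuild ds index "").2 = (aFallback ds).getD "" := by
  induction ds generalizing index with
  | nil => simp [bBuild, aFallback]
  | cons item rest ih =>
    simp only [bBuild, aFallback]
    by_cases hlab : pyText (pyGetItem item "description") = ""
    · rw [if_pos hlab, ih, if_neg (by simpa using hlab)]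
    · rw [if_neg hlab]
      simp only [if_true]
      rw [bBuild_fallback_stuck _ _ _ hlab, if_pos hlab]
      rfl

-- the lookup loop over prefer equals A's outer loop
theorem bLookup_eq (ds : List (List (String × String))) (prefer : List String) :
    bLookup (bBuild ds PySem.Dict.empty "").1 prefer = aPreferLoop ds prefer := by
  induction prefer with
  | nil => rfl
  | cons l ls ih =>
    simp only [bLookup, aPreferLoop, bBuild_get?, PySem.Dict.get?_empty, ih]

-- ===== VERDICT (by name: the statement is the Claim_ definition above) =====
theorem selected_description_spec : Claim_equal_selected_description := by
  intro descriptions prefer _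
  unfold Spec_selected_description selected_description selected_description_alt
  cases descriptions with
  | none => rfl
  | some ds =>
    by_cases h : ds = []
    · simp [h]
    · simp only [if_neg h, bLookup_eq]
      cases aPreferLoop ds prefer with
      | some s => rfl
      | none =>
        simp only
        rw [bBuild_fallback]
        cases aFallback ds <;> rfl
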